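-- pv_equiv track=rewrite | github.com/qazpllp/tob | code/zone/management/commands/get_stories.py | txt2markdown
-- ===== SOURCE A (Python) =====
-- def txt2markdown(text):
-- 	"""
-- 	Converts (plain) text to markdown.
-- 	"""
-- 	# Convert single newlines to double - so they are visible in MD
-- 	text = "\n\n".join(text.split("\n"))
--
-- 	# Escape MD characters
-- 	replace = {
-- 		"<": "&lt;",
-- 		">": "&gt;",
-- 	}
-- 	for r,replacement in replace.items():
-- 		text = text.replace(r, replacement)
--
-- 	return text
-- ===== SOURCE B (Python) =====
-- def txt2markdown(text):
-- 	"""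
-- 	Converts (plain) text to markdown, in a single pass over the characters.
-- 	"""
-- 	mapping = {"\n": "\n\n", "<": "&lt;", ">": "&gt;"}
-- 	out = []
-- 	for c in text:
-- 		out.append(mapping.get(c, c))
-- 	return "".join(out)
-- ===== Notes on version B (the rewrite author's own statement) =====
-- stated objective: alternative
-- what changed: Replaces A's three sequential whole-string passes (split on newline + join, then two replace calls) with a single loop over the characters that emits each character's escape via one dict lookup.
import Mathlib
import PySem

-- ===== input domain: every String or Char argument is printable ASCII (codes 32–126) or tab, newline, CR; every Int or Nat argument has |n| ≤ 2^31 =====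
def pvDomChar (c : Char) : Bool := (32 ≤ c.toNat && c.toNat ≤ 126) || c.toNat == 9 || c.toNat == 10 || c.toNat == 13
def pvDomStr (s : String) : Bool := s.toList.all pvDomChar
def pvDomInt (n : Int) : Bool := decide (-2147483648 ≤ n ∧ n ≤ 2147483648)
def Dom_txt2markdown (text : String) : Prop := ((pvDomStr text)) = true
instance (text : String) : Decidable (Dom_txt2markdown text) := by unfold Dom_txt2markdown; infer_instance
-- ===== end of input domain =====

-- B replaces A's three sequential whole-string passes (split/join + two replaces) with a
-- single pass over the characters using a dict lookup; same output, same cost (objective: alternative).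

-- ===== PORT A =====
def txt2markdown (text : String) : String :=
  -- text = "\n\n".join(text.split("\n"))  (sep "\n" is non-empty, so split? is always `some`)
  let text1 := PySem.Str.join "\n\n" ((PySem.Str.split? text "\n").getD [])
  -- the dict loop performs, in insertion order, replace "<" then replace ">"
  let text2 := PySem.Str.replace text1 "<" "&lt;"
  let text3 := PySem.Str.replace text2 ">" "&gt;"
  text3

-- ===== PORT B =====
def txt2markdown_alt (text : String) : String :=
  let mapping : PySem.Dict String String :=
    ((PySem.Dict.empty.insert "\n" "\n\n").insert "<" "&lt;").insert ">" "&gt;"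
  PySem.Str.join "" (text.toList.map (fun c => mapping.getD (String.ofList [c]) (String.ofList [c])))

-- ===== PRECONDITION & SPEC =====
def Spec_txt2markdown (text : String) (out : String) : Prop := out = txt2markdown_alt text
instance (text : String) (out : String) : Decidable (Spec_txt2markdown text out) := by unfold Spec_txt2markdown; infer_instance

-- ===== CLAIM (what is proved, stated in full; the proofs are below) =====
def Claim_equal_txt2markdown : Prop := ∀ (text : String), Dom_txt2markdown text → Spec_txt2markdown text (txt2markdown text)

-- ===== LEMMAS AND PROOFS =====

-- pure (fuel-free) version of PySem.Chars.splitOn.go for sep = ['\n']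
def pvSplit : List Char → List Char → List (List Char)
  | [], cur => [cur.reverse]
  | c :: t, cur => if c = '\n' then cur.reverse :: pvSplit t [] else pvSplit t (c :: cur)

-- the per-character escape, composed
def pvF1 (c : Char) : List Char := if c = '\n' then ['\n', '\n'] else [c]
def pvF2 (c : Char) : List Char := if c = '<' then "&lt;".toList else [c]
def pvF3 (c : Char) : List Char := if c = '>' then "&gt;".toList else [c]

theorem pv_join_nil_flatten (xss : List (List Char)) :
    PySem.Chars.join [] xss = xss.flatten := by
  induction xss with
  | nil => rfl
  | cons a r ih =>
    cases r with
    | nil => simp [PySem.Chars.join, List.intercalate]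
    | cons b r' =>
      simp only [PySem.Chars.join, List.intercalate] at ih ⊢
      simp [List.intersperse, List.flatten] at ih ⊢
      exact ih

theorem pv_splitOn_go (l cur : List Char) (acc : List (List Char)) :
    ∀ fuel, l.length < fuel →
      PySem.Chars.splitOn.go ['\n'] fuel l cur acc = acc.reverse ++ pvSplit l cur := by
  induction l generalizing cur acc with
  | nil =>
    intro fuel h
    match fuel, h with
    | fuel + 1, _ => simp [PySem.Chars.splitOn.go, pvSplit]
  | cons c t ih =>
    intro fuel h
    match fuel, h with
    | fuel + 1, h =>
      by_cases hc : c = '\n'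
      · subst hc
        have : (['\n'] : List Char).isPrefixOf ('\n' :: t) = true := by simp [List.isPrefixOf]
        simp only [PySem.Chars.splitOn.go, this, if_true, List.length_cons, List.length_nil,
          List.drop_succ_cons, List.drop_zero]
        rw [ih [] (cur.reverse :: acc) fuel (by simpa using Nat.lt_of_succ_lt_succ h)]
        simp [pvSplit]
      · have hpre : (['\n'] : List Char).isPrefixOf (c :: t) = false := by
          simp [List.isPrefixOf]; exact fun h' => hc h'.symm
        simp only [PySem.Chars.splitOn.go, hpre, Bool.false_eq_true, if_false]
        rw [ih (c :: cur) acc fuel (by simpa using Nat.lt_of_succ_lt_succ h)]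
        simp [pvSplit, hc]

theorem pvSplit_ne_nil (l cur : List Char) : pvSplit l cur ≠ [] := by
  induction l generalizing cur with
  | nil => simp [pvSplit]
  | cons c t ih =>
    simp only [pvSplit]
    split
    · simp
    · exact ih _

theorem pv_join_pvSplit (l cur : List Char) :
    PySem.Chars.join ['\n', '\n'] (pvSplit l cur) = cur.reverse ++ l.flatMap pvF1 := by
  induction l generalizing cur with
  | nil => simp [pvSplit, PySem.Chars.join, List.intercalate]
  | cons c t ih =>
    by_cases hc : c = '\n'
    · subst hc
      simp only [pvSplit, if_true]
      have : PySem.Chars.join ['\n', '\n'] (cur.reverse :: pvSplit t []) =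
          cur.reverse ++ ['\n', '\n'] ++ PySem.Chars.join ['\n', '\n'] (pvSplit t []) := by
        cases h : pvSplit t [] with
        | nil => exact absurd h (pvSplit_ne_nil t [])
        | cons a r => simp [PySem.Chars.join, List.intercalate, List.intersperse]
      rw [this, ih []]
      simp [pvF1, List.flatMap_cons]
    · simp only [pvSplit, if_neg hc]
      rw [ih (c :: cur)]
      simp [pvF1, hc, List.flatMap_cons]

theorem pv_replace_single (a : Char) (new : List Char) (l acc : List Char) :
    ∀ fuel, l.length ≤ fuel →
      PySem.Chars.replace.go [a] new fuel l acc =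
        acc.reverse ++ l.flatMap (fun c => if c = a then new else [c]) := by
  induction l generalizing acc with
  | nil =>
    intro fuel _
    cases fuel <;> simp [PySem.Chars.replace.go]
  | cons c t ih =>
    intro fuel h
    match fuel, h with
    | fuel + 1, h =>
      by_cases hc : c = a
      · subst hc
        have : ([c] : List Char).isPrefixOf (c :: t) = true := by simp [List.isPrefixOf]
        simp only [PySem.Chars.replace.go, this, if_true, List.length_singleton,
          List.drop_succ_cons, List.drop_zero]
        rw [ih (new.reverse ++ acc) fuel (Nat.le_of_succ_le_succ h)]
        simp [List.flatMap_cons]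
      · have hpre : ([a] : List Char).isPrefixOf (c :: t) = false := by
          simp [List.isPrefixOf]; exact fun h' => hc h'.symm
        simp only [PySem.Chars.replace.go, hpre, Bool.false_eq_true, if_false]
        rw [ih (c :: acc) fuel (Nat.le_of_succ_le_succ h)]
        simp [List.flatMap_cons, hc]

theorem pv_replace_eq (a : Char) (new l : List Char) :
    PySem.Chars.replace l [a] new = l.flatMap (fun c => if c = a then new else [c]) := by
  simp only [PySem.Chars.replace, List.isEmpty_cons, Bool.false_eq_true, if_false]
  exact pv_replace_single a new l [] l.length (le_refl _)

theorem pv_flatMap_assoc (l : List Char) (f g : Char → List Char) :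
    (l.flatMap f).flatMap g = l.flatMap (fun x => (f x).flatMap g) := by
  induction l with
  | nil => rfl
  | cons c t ih => simp [List.flatMap_cons, List.flatMap_append, ih]

theorem pv_charwise (c : Char) :
    (pvF1 c).flatMap (fun x => (pvF2 x).flatMap pvF3) =
      (((((PySem.Dict.empty.insert "\n" "\n\n").insert "<" "&lt;").insert ">" "&gt;" :
        PySem.Dict String String).getD (String.ofList [c]) (String.ofList [c]))).toList := by
  by_cases h1 : c = '\n'
  · subst h1; decide
  · by_cases h2 : c = '<'
    · subst h2; decide
    · by_cases h3 : c = '>'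
      · subst h3; decide
      · have e1 : ("\n" == String.ofList [c]) = false := by
          rw [beq_eq_false_iff_ne]; intro h; exact h1 (by
            have := congrArg String.toList h.symm; simpa using this)
        have e2 : ("<" == String.ofList [c]) = false := by
          rw [beq_eq_false_iff_ne]; intro h; exact h2 (by
            have := congrArg String.toList h.symm; simpa using this)
        have e3 : (">" == String.ofList [c]) = false := by
          rw [beq_eq_false_iff_ne]; intro h; exact h3 (by
            have := congrArg String.toList h.symm; simpa using this)
        simp [pvF1, pvF2, pvF3, h1, h2, h3, List.find?,
          PySem.Dict.getD, PySem.Dict.get?, PySem.Dict.insert, PySem.Dict.empty, e1, e2, e3]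

-- ===== VERDICT (by name: the statement is the Claim_ definition above) =====
theorem txt2markdown_spec : Claim_equal_txt2markdown := by
  intro text _
  unfold Spec_txt2markdown txt2markdown txt2markdown_alt
  simp only [PySem.Str.split?, PySem.Chars.split?, PySem.Str.join, PySem.Str.replace,
    PySem.Chars.splitOn, show ("\n".toList : List Char) = ['\n'] from rfl,
    List.isEmpty_cons, Bool.false_eq_true, if_false, Option.map_some, Option.getD_some,
    List.map_map, Function.comp_def, String.toList_ofList]
  rw [pv_splitOn_go text.toList [] [] (text.toList.length + 1) (Nat.lt_succ_self _)]
  simp only [List.reverse_nil, List.nil_append, List.map_id_fun', id]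
  rw [show ("\n\n".toList : List Char) = ['\n', '\n'] from rfl,
    show ("<".toList : List Char) = ['<'] from rfl,
    show (">".toList : List Char) = ['>'] from rfl,
    pv_join_pvSplit text.toList []]
  simp only [List.reverse_nil, List.nil_append]
  rw [pv_replace_eq '<' "&lt;".toList, pv_replace_eq '>' "&gt;".toList,
    pv_flatMap_assoc, pv_flatMap_assoc,
    show ("".toList : List Char) = [] from rfl, pv_join_nil_flatten]
  congr 1
  generalize text.toList = cs
  induction cs with
  | nil => rfl
  | cons c t ih =>
    simp only [List.flatMap_cons, List.map_cons, List.flatten_cons, ih]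
    congr 1
    exact pv_charwise c
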